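-- pv_equiv track=rewrite | github.com/PM-Frontier-Labs/judge-gated-orchestrator | tools-v1-backup/judge.py | _analyze_failure_context
-- ===== SOURCE A (Python) =====
-- from typing import Dict, List, Any, Optional
--
-- def _analyze_failure_context(issues: List[str], gate_results: Dict[str, List[str]]) -> Dict[str, Any]:
--     """Analyze what mechanisms are relevant for this failure."""
--     context = {
--         "has_drift": any("out-of-scope" in issue.lower() for issue in issues),
--         "has_test_failures": any("test" in issue.lower() for issue in issues),
--         "has_plan_corruption": any("plan changed mid-phase" in issue.lower() for issue in issues),
--         "has_lint_failures": any("lint" in issue.lower() for issue in issues),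
--         "has_forbidden_files": any("forbidden" in issue.lower() for issue in issues),
--     }
--     return context
-- ===== SOURCE B (Python) =====
-- from typing import Dict, List, Any
--
-- # Table-driven: flag name -> triggering substring.
-- _FLAG_KEYWORDS = [
--     ("has_drift", "out-of-scope"),
--     ("has_test_failures", "test"),
--     ("has_plan_corruption", "plan changed mid-phase"),
--     ("has_lint_failures", "lint"),
--     ("has_forbidden_files", "forbidden"),
-- ]
--
--
-- def _analyze_failure_context(issues: List[str], gate_results: Dict[str, List[str]]) -> Dict[str, Any]:
--     """Accumulate the set of matched flag names in one pass (early exit once all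
--     flags have matched), then build the dict from the table by membership."""
--     matched = set()
--     for issue in issues:
--         low = issue.lower()
--         matched.update(name for name, kw in _FLAG_KEYWORDS if kw in low)
--         if len(matched) == len(_FLAG_KEYWORDS):
--             break
--     return {name: name in matched for name, _ in _FLAG_KEYWORDS}
-- ===== Notes on version B (the rewrite author's own statement) =====
-- stated objective: alternative
-- what changed: Replaces five independent any() scans (each recomputing issue.lower()) by a keyword table driving one pass that lowers each issue once, accumulates the set of matched flag names, exits early once every flag has matched, and builds the result dict by membership in that set.
import Mathlib
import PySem

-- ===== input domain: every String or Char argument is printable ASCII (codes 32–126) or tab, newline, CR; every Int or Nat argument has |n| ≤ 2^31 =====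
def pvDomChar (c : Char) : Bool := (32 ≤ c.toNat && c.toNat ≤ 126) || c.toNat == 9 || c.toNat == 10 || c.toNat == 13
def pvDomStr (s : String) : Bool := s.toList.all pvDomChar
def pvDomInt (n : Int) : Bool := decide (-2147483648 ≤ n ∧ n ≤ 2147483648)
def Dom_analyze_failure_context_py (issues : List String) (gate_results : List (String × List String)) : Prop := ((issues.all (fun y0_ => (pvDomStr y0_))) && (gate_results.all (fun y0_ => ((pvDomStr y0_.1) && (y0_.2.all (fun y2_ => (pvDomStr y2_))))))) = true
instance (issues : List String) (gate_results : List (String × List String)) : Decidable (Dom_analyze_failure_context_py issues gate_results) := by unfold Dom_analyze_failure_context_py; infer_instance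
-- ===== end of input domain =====

-- B replaces A's five independent any() scans by a keyword table driving one pass that
-- accumulates the set of matched flag names (early exit once all have matched).

-- ===== PORT A =====
-- Five independent any() scans, as in A; .lower() recomputed in each scan.
def analyze_failure_context_py (issues : List String) (gate_results : List (String × List String)) : List (String × Bool) :=
  [("has_drift", issues.any (fun issue => PySem.Str.isIn "out-of-scope" (PySem.Str.lower issue))),
   ("has_test_failures", issues.any (fun issue => PySem.Str.isIn "test" (PySem.Str.lower issue))),
   ("has_plan_corruption", issues.any (fun issue => PySem.Str.isIn "plan changed mid-phase" (PySem.Str.lower issue))),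
   ("has_lint_failures", issues.any (fun issue => PySem.Str.isIn "lint" (PySem.Str.lower issue))),
   ("has_forbidden_files", issues.any (fun issue => PySem.Str.isIn "forbidden" (PySem.Str.lower issue)))]

-- ===== PORT B =====
-- Source B's keyword table _FLAG_KEYWORDS.
def afcTable : List (String × String) :=
  [("has_drift", "out-of-scope"),
   ("has_test_failures", "test"),
   ("has_plan_corruption", "plan changed mid-phase"),
   ("has_lint_failures", "lint"),
   ("has_forbidden_files", "forbidden")]

-- Source B's loop: one .lower() per issue, matched.update(names whose keyword occurs),
-- break as soon as len(matched) == len(_FLAG_KEYWORDS).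
def afcLoop : List String → PySem.Set String → PySem.Set String
  | [], matched => matched
  | issue :: rest, matched =>
    let low := PySem.Str.lower issue
    let matched' := PySem.Set.update matched
      ((afcTable.filter (fun p => PySem.Str.isIn p.2 low)).map Prod.fst)
    if PySem.Set.len matched' == afcTable.length then matched'
    else afcLoop rest matched'

-- {name: name in matched for name, _ in _FLAG_KEYWORDS}
def analyze_failure_context_py_alt (issues : List String) (gate_results : List (String × List String)) : List (String × Bool) :=
  let matched := afcLoop issues PySem.Set.empty
  afcTable.map (fun p => (p.1, PySem.Set.contains matched p.1))

-- ===== PRECONDITION & SPEC =====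
def Spec_analyze_failure_context_py (issues : List String) (gate_results : List (String × List String)) (out : List (String × Bool)) : Prop := out = analyze_failure_context_py_alt issues gate_results
instance (issues : List String) (gate_results : List (String × List String)) (out : List (String × Bool)) : Decidable (Spec_analyze_failure_context_py issues gate_results out) := by unfold Spec_analyze_failure_context_py; infer_instance

-- ===== CLAIM (what is proved, stated in full; the proofs are below) =====
def Claim_equal_analyze_failure_context_py : Prop := ∀ (issues : List String) (gate_results : List (String × List String)), Dom_analyze_failure_context_py issues gate_results → Spec_analyze_failure_context_py issues gate_results (analyze_failure_context_py issues gate_results)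

-- ===== LEMMAS AND PROOFS =====

-- name ∈ the flag names matched for one lowered issue ↔ its own keyword occurs there.
theorem afc_hits_mem (name kw : String) (hmem : (name, kw) ∈ afcTable) (low : String) :
    (name ∈ (afcTable.filter (fun p => PySem.Str.isIn p.2 low)).map Prod.fst)
      ↔ PySem.Str.isIn kw low = true := by
  fin_cases hmem <;> simp [afcTable, List.mem_map, List.mem_filter]

-- Loop invariant: for any nodup matched ⊆ flag names, membership in the loop's result is
-- membership before it or a hit in the remaining issues (the early exit returns a set that
-- is a permutation of all five names, so it already contains every name).
set_option maxHeartbeats 1000000 in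
theorem afc_loop_mem (name kw : String) (hmem : (name, kw) ∈ afcTable)
    (issues : List String) (matched : PySem.Set String)
    (hn : matched.Nodup) (hs : ∀ x ∈ matched, x ∈ afcTable.map Prod.fst) :
    (name ∈ afcLoop issues matched)
      ↔ name ∈ matched ∨ (issues.any (fun i => PySem.Str.isIn kw (PySem.Str.lower i))) = true := by
  induction issues generalizing matched with
  | nil => simp [afcLoop]
  | cons issue rest ih =>
    rw [afcLoop]
    set low := PySem.Str.lower issue with hlow
    set matched' := PySem.Set.update matched
      ((afcTable.filter (fun p => PySem.Str.isIn p.2 low)).map Prod.fst) with hm'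
    have hn' : matched'.Nodup := PySem.Set.nodup_update _ _ hn
    have hs' : ∀ x ∈ matched', x ∈ afcTable.map Prod.fst := by
      intro x hx
      rcases (PySem.Set.mem_update _ _ _).1 hx with hcase | hcase
      · exact hs x hcase
      · rcases List.mem_map.1 hcase with ⟨p, hp, rfl⟩
        exact List.mem_map.2 ⟨p, List.mem_of_mem_filter hp, rfl⟩
    have hmem' : (name ∈ matched') ↔ name ∈ matched ∨ PySem.Str.isIn kw low = true := by
      rw [hm', PySem.Set.mem_update, afc_hits_mem name kw hmem low]
    by_cases hbr : (PySem.Set.len matched' == afcTable.length) = true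
    · rw [if_pos hbr]
      have hlen : matched'.length = (afcTable.map Prod.fst).length := by
        have h2 : PySem.Set.len matched' = (afcTable.length : Int) := by exact_mod_cast beq_iff_eq.1 hbr
        simp only [PySem.Set.len] at h2
        simp only [List.length_map]
        exact_mod_cast h2
      have hperm : matched'.Perm (afcTable.map Prod.fst) :=
        (hn'.subperm hs').perm_of_length_le (le_of_eq hlen.symm)
      have hin : name ∈ matched' := hperm.mem_iff.2 (List.mem_map.2 ⟨(name, kw), hmem, rfl⟩)
      constructor
      · intro _
        rcases hmem'.1 hin with hcase | hcase
        · exact Or.inl hcase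
        · refine Or.inr ?_
          simp only [List.any_cons, List.any_eq_true, Bool.or_eq_true]
          exact Or.inl (by simpa [PySem.Str.isIn, pysem, hlow] using hcase)
      · intro _; exact hin
    · rw [if_neg hbr, ih matched' hn' hs', hmem']
      simp [List.any_cons, or_assoc, hlow, PySem.Str.isIn, pysem]

-- Bool-level form: starting from the empty set, membership is exactly A's any() scan.
theorem afc_loop_contains (name kw : String) (hmem : (name, kw) ∈ afcTable) (issues : List String) :
    PySem.Set.contains (afcLoop issues PySem.Set.empty) name
      = issues.any (fun i => PySem.Str.isIn kw (PySem.Str.lower i)) := by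
  have h := afc_loop_mem name kw hmem issues PySem.Set.empty (by simp [PySem.Set.empty]) (by simp [PySem.Set.empty])
  simp only [PySem.Set.empty, List.not_mem_nil, false_or] at h
  rw [Bool.eq_iff_iff, PySem.Set.contains_iff]
  exact h

-- ===== VERDICT (by name: the statement is the Claim_ definition above) =====
theorem analyze_failure_context_py_spec : Claim_equal_analyze_failure_context_py := by
  intro issues gate_results _
  unfold Spec_analyze_failure_context_py analyze_failure_context_py analyze_failure_context_py_alt
  show _ = List.map _ afcTable
  simp only [afcTable, List.map]
  rw [afc_loop_contains "has_drift" "out-of-scope" (by decide),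
      afc_loop_contains "has_test_failures" "test" (by decide),
      afc_loop_contains "has_plan_corruption" "plan changed mid-phase" (by decide),
      afc_loop_contains "has_lint_failures" "lint" (by decide),
      afc_loop_contains "has_forbidden_files" "forbidden" (by decide)]
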